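-- pv_equiv track=rewrite | github.com/irongiant33/AdventOfCode | 2015/Day8/src/day8_ai.py | count_encoded_characters
-- ===== SOURCE A (Python) =====
-- def count_encoded_characters(s):
--     """Calculate characters in the encoded string."""
--     encoded = 2  # Start with surrounding quotes
--     for c in s:
--         if c in ['"', '\\']:
--             encoded += 2  # Each " or \ needs escaping (adds 2 chars: \")
--         else:
--             encoded += 1
--     return encoded
-- ===== SOURCE B (Python) =====
-- def count_encoded_characters(s):
--     """Materialize the JSON-style encoded string and measure its length."""
--     encoded = '"' + s.replace('\\', '\\\\').replace('"', '\\"') + '"'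
--     return len(encoded)
-- ===== Notes on version B (the rewrite author's own statement) =====
-- stated objective: alternative
-- what changed: Instead of counting with a per-character branching loop, B actually constructs the encoded string (two str.replace passes in C to escape backslashes then quotes, plus the surrounding quotes) and returns its length.
import Mathlib
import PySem

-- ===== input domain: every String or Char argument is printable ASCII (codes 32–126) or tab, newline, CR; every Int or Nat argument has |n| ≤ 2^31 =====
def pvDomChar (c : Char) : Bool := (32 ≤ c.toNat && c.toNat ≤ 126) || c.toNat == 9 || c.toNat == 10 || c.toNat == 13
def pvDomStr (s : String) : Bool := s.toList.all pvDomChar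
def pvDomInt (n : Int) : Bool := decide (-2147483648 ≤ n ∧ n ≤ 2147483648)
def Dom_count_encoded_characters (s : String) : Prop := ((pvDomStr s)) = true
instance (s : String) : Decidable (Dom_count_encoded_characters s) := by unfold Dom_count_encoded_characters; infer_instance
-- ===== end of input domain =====

-- B constructs the encoded string (two replace passes plus surrounding quotes) and returns its length, instead of A's per-character counting loop; same O(n), different strategy (return value only).


-- ===== PORT A =====
-- loop: encoded starts at 2; each char adds 2 if it is '"' or '\', else 1
def count_encoded_characters (s : String) : Int :=
  s.toList.foldl (fun encoded c => if c ∈ ['"', '\\'] then encoded + 2 else encoded + 1) 2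

-- ===== PORT B =====
-- build '"' + s.replace('\\','\\\\').replace('"','\\"') + '"', return its length
def count_encoded_characters_alt (s : String) : Int :=
  let encoded := "\"" ++ PySem.Str.replace (PySem.Str.replace s "\\" "\\\\") "\"" "\\\"" ++ "\""
  (PySem.Str.len encoded : Int)

-- ===== PRECONDITION & SPEC =====
def Spec_count_encoded_characters (s : String) (out : Int) : Prop := out = count_encoded_characters_alt s
instance (s : String) (out : Int) : Decidable (Spec_count_encoded_characters s out) := by unfold Spec_count_encoded_characters; infer_instance

-- ===== CLAIM (what is proved, stated in full; the proofs are below) =====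
def Claim_equal_count_encoded_characters : Prop := ∀ (s : String), Dom_count_encoded_characters s → Spec_count_encoded_characters s (count_encoded_characters s)

-- ===== LEMMAS AND PROOFS =====

-- replace with a single-character pattern is a flatMap over the characters
theorem replace_go_singleton (c : Char) (new : List Char) (fuel : Nat) (l acc : List Char)
    (h : l.length ≤ fuel) :
    PySem.Chars.replace.go [c] new fuel l acc
      = acc.reverse ++ l.flatMap (fun x => if x = c then new else [x]) := by
  induction fuel generalizing l acc with
  | zero =>
    have : l = [] := List.length_eq_zero_iff.mp (Nat.le_zero.mp h)
    subst this; simp [PySem.Chars.replace.go]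
  | succ n ih =>
    cases l with
    | nil => simp [PySem.Chars.replace.go]
    | cons x t =>
      by_cases hx : x = c
      · subst hx
        have hpre : List.isPrefixOf [x] (x :: t) = true := by simp [List.isPrefixOf]
        simp only [PySem.Chars.replace.go, hpre, if_pos]
        rw [show List.drop (List.length [x]) (x :: t) = t by simp]
        rw [ih t (new.reverse ++ acc) (by simpa using Nat.le_of_succ_le_succ h)]
        simp
      · have hpre : List.isPrefixOf [c] (x :: t) = false := by
          simp [List.isPrefixOf]; exact fun h' => hx h'.symm
        simp only [PySem.Chars.replace.go, hpre, if_false, Bool.false_eq_true]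
        rw [ih t (x :: acc) (by simpa using Nat.le_of_succ_le_succ h)]
        simp [hx]

theorem replace_singleton (c : Char) (new : List Char) (l : List Char) :
    PySem.Chars.replace l [c] new = l.flatMap (fun x => if x = c then new else [x]) := by
  simp only [PySem.Chars.replace, List.isEmpty_cons, Bool.false_eq_true, if_false]
  simpa using replace_go_singleton c new l.length l [] (le_refl _)

-- lengths/counts through the two escaping passes
theorem len_escape_backslash (l : List Char) :
    (l.flatMap (fun x => if x = '\\' then ['\\', '\\'] else [x])).length
      = l.length + l.count '\\' := by
  induction l with
  | nil => simp
  | cons x t ih =>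
    by_cases hx : x = '\\' <;> simp [hx, List.count_cons, ih] <;> omega

theorem count_quote_escape_backslash (l : List Char) :
    (l.flatMap (fun x => if x = '\\' then ['\\', '\\'] else [x])).count '"'
      = l.count '"' := by
  induction l with
  | nil => simp
  | cons x t ih =>
    by_cases hx : x = '\\'
    · subst hx; simp [List.count_cons, ih]
    · simp [hx, List.count_cons, ih]

theorem len_escape_quote (l : List Char) :
    (l.flatMap (fun x => if x = '"' then ['\\', '"'] else [x])).length
      = l.length + l.count '"' := by
  induction l with
  | nil => simp
  | cons x t ih =>
    by_cases hx : x = '"' <;> simp [hx, List.count_cons, ih] <;> omega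

-- A's fold in closed form
theorem foldl_encoded (l : List Char) (a : Int) :
    l.foldl (fun encoded c => if c ∈ ['"', '\\'] then encoded + 2 else encoded + 1) a
      = a + l.length + l.count '"' + l.count '\\' := by
  induction l generalizing a with
  | nil => simp
  | cons x t ih =>
    simp only [List.foldl_cons, ih, List.length_cons, List.count_cons]
    by_cases h1 : x = '"'
    · subst h1; simp; ring
    · by_cases h2 : x = '\\'
      · subst h2; simp; ring
      · simp [h1, h2]; ring

-- ===== VERDICT (by name: the statement is the Claim_ definition above) =====
theorem count_encoded_characters_spec : Claim_equal_count_encoded_characters := by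
  intro s _
  show count_encoded_characters s = count_encoded_characters_alt s
  unfold count_encoded_characters count_encoded_characters_alt
  rw [foldl_encoded]
  simp only [PySem.Str.len, PySem.Str.replace, String.toList_append, String.toList_ofList,
    PySem.Chars.len_eq, List.length_append]
  rw [show ("\\" : String).toList = ['\\'] from rfl, show ("\\\\" : String).toList = ['\\','\\'] from rfl,
    show ("\"" : String).toList = ['"'] from rfl, show ("\\\"" : String).toList = ['\\','"'] from rfl]
  rw [replace_singleton, replace_singleton, len_escape_quote, count_quote_escape_backslash,
    len_escape_backslash]
  simp only [List.length_singleton]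
  push_cast
  ring
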